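-- pv_equiv track=rewrite | github.com/dinesh1199md/python-code | python-practicecode/linked-in-codes/setofcode.py | max_min_sum
-- ===== SOURCE A (Python) =====
-- def max_min_sum(l):
--     max=l[0]
--     min=l[0]
--     sum=0
--     for i in l:
--         sum+=i
--         if i>max:
--             max=i
--         if i<min:
--             min=i
--
--     return max,min,sum
-- ===== SOURCE B (Python) =====
-- def max_min_sum(l):
--     s = sorted(l)
--     return s[-1], s[0], sum(s)
-- ===== Notes on version B (the rewrite author's own statement) =====
-- stated objective: alternative
-- what changed: Replaces A's single simultaneous accumulator pass with sorting the list once and reading max from the last element, min from the first, and summing the sorted copy.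
import Mathlib
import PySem

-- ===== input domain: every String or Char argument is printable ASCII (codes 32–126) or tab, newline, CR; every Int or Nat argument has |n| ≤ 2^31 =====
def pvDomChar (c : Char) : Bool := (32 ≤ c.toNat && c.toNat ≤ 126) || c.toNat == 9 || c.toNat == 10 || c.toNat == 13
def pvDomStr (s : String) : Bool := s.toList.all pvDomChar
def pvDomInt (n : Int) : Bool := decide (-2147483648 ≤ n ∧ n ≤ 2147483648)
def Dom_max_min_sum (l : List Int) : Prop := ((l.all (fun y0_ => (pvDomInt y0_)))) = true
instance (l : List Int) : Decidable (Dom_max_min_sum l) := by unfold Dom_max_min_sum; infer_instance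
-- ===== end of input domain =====

-- B derives max/min/sum from one sorted copy instead of A's single accumulator pass; equal return values on nonempty lists (both raise IndexError on []).

-- ===== PORT A =====
-- literal port of A: seed max=min=l[0], sum=0, then one fold updating sum, max, min
def max_min_sum (l : List Int) : Int × Int × Int :=
  let m0 := (PySem.List.pyGet? l 0).getD 0   -- l[0]; Pre_ excludes [] where Python raises IndexError
  l.foldl (fun st i =>
    let sum := st.2.2 + i
    let mx := if i > st.1 then i else st.1
    let mn := if i < st.2.1 then i else st.2.1
    (mx, mn, sum)) (m0, m0, 0)

-- ===== PORT B =====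
-- literal port of Source B: s = sorted(l); return s[-1], s[0], sum(s)
def max_min_sum_alt (l : List Int) : Int × Int × Int :=
  let s := PySem.List.sorted l (fun x => x) false
  ((PySem.List.pyGet? s (-1)).getD 0,        -- s[-1]; Pre_ excludes [] where Python raises IndexError
   (PySem.List.pyGet? s 0).getD 0,           -- s[0]
   s.sum)

-- ===== PRECONDITION & SPEC =====
-- Pre_ excludes only the empty list, on which both A and B raise IndexError.
def Pre_max_min_sum (l : List Int) : Prop := l ≠ []
instance (l : List Int) : Decidable (Pre_max_min_sum l) := by unfold Pre_max_min_sum; infer_instance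
def pvWitness_max_min_sum : List Int := [3, -1, 4]

def Spec_max_min_sum (l : List Int) (out : Int × Int × Int) : Prop := out = max_min_sum_alt l
instance (l : List Int) (out : Int × Int × Int) : Decidable (Spec_max_min_sum l out) := by unfold Spec_max_min_sum; infer_instance

-- ===== CLAIM (what is proved, stated in full; the proofs are below) =====
def Claim_equal_max_min_sum : Prop := ∀ (l : List Int), Dom_max_min_sum l → Pre_max_min_sum l → Spec_max_min_sum l (max_min_sum l)

-- ===== LEMMAS AND PROOFS =====

-- A's fold splits into three independent accumulations
lemma foldA_split (l : List Int) (a b c : Int) :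
    l.foldl (fun st i =>
      let sum := st.2.2 + i
      let mx := if i > st.1 then i else st.1
      let mn := if i < st.2.1 then i else st.2.1
      ((mx, mn, sum) : Int × Int × Int)) (a, b, c)
    = (l.foldl (fun x i => max x i) a, l.foldl (fun x i => min x i) b, c + l.sum) := by
  induction l generalizing a b c with
  | nil => simp
  | cons h t ih =>
      simp only [List.foldl_cons, List.sum_cons, ih]
      refine Prod.ext ?_ (Prod.ext ?_ ?_) <;> simp [max_def, min_def] <;>
        first
        | (congr 1; omega)
        | ring

lemma foldl_max_le (l : List Int) (a c : Int) (ha : a ≤ c) (h : ∀ x ∈ l, x ≤ c) :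
    l.foldl (fun x i => max x i) a ≤ c := by
  induction l generalizing a with
  | nil => simpa using ha
  | cons y t ih =>
      exact ih (max a y) (max_le ha (h y (by simp))) (fun x hx => h x (by simp [hx]))

lemma le_foldl_max_init (l : List Int) (a : Int) : a ≤ l.foldl (fun x i => max x i) a := by
  induction l generalizing a with
  | nil => simp
  | cons y t ih => exact le_trans (le_max_left a y) (ih (max a y))

lemma mem_le_foldl_max (l : List Int) (a x : Int) (hx : x ∈ l) :
    x ≤ l.foldl (fun x i => max x i) a := by
  induction l generalizing a with
  | nil => simp at hx
  | cons y t ih =>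
      rcases List.mem_cons.mp hx with rfl | hx
      · exact le_trans (le_max_right a x) (le_foldl_max_init t _)
      · exact ih _ hx

lemma le_foldl_min (l : List Int) (a c : Int) (ha : c ≤ a) (h : ∀ x ∈ l, c ≤ x) :
    c ≤ l.foldl (fun x i => min x i) a := by
  induction l generalizing a with
  | nil => simpa using ha
  | cons y t ih =>
      exact ih (min a y) (le_min ha (h y (by simp))) (fun x hx => h x (by simp [hx]))

lemma foldl_min_le_init (l : List Int) (a : Int) : l.foldl (fun x i => min x i) a ≤ a := by
  induction l generalizing a with
  | nil => simp
  | cons y t ih => exact le_trans (ih (min a y)) (min_le_left a y)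

lemma foldl_min_le_mem (l : List Int) (a x : Int) (hx : x ∈ l) :
    l.foldl (fun x i => min x i) a ≤ x := by
  induction l generalizing a with
  | nil => simp at hx
  | cons y t ih =>
      rcases List.mem_cons.mp hx with rfl | hx
      · exact le_trans (foldl_min_le_init t _) (min_le_right a x)
      · exact ih _ hx

-- in a ≤-pairwise list every element is ≤ the last one
lemma le_getLast_of_pairwise (s : List Int) (hp : s.Pairwise (· ≤ ·)) (hne : s ≠ []) :
    ∀ x ∈ s, x ≤ s.getLast hne := by
  induction s with
  | nil => simp at hne
  | cons a t ih =>
      rcases List.pairwise_cons.mp hp with ⟨ha, hpt⟩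
      intro x hx
      cases t with
      | nil => simp at hx; simp [List.getLast, hx]
      | cons b u =>
          rw [List.getLast_cons (by simp)]
          rcases List.mem_cons.mp hx with rfl | hx
          · exact le_trans (ha b (by simp)) (ih hpt (by simp) b (by simp))
          · exact ih hpt (by simp) x hx

-- ===== VERDICT (by name: the statement is the Claim_ definition above) =====
theorem max_min_sum_spec : Claim_equal_max_min_sum := by
  intro l _ hpre
  obtain ⟨h0, t0, rfl⟩ := List.exists_cons_of_ne_nil hpre
  unfold Spec_max_min_sum max_min_sum max_min_sum_alt
  dsimp only
  set s := PySem.List.sorted (h0 :: t0) (fun x => x) false with hs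
  have hperm : s.Perm (h0 :: t0) := PySem.List.sorted_perm _ _ _
  have hne : s ≠ [] := by simp [hs, PySem.List.sorted_eq_nil_iff]
  obtain ⟨m, t, hmt⟩ := List.exists_cons_of_ne_nil hne
  have hpair : s.Pairwise (fun a b => a ≤ b) := PySem.List.sorted_pairwise _ _
  have hmem : ∀ x, x ∈ s ↔ x ∈ h0 :: t0 := fun x => hperm.mem_iff
  have hhead : (PySem.List.pyGet? s 0).getD 0 = m := by
    rw [PySem.List.pyGet?_zero, hmt]; rfl
  have hlastv : (PySem.List.pyGet? s (-1)).getD 0 = s.getLast hne := by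
    rw [PySem.List.pyGet?_neg_one, List.getLast?_eq_some_getLast hne]; rfl
  have hLmem : s.getLast hne ∈ h0 :: t0 := (hmem _).mp (List.getLast_mem hne)
  have hLub : ∀ x ∈ h0 :: t0, x ≤ s.getLast hne :=
    fun x hx => le_getLast_of_pairwise s hpair hne x ((hmem x).mpr hx)
  have hmmem : m ∈ h0 :: t0 := (hmem m).mp (by simp [hmt])
  have hmlb : ∀ x ∈ h0 :: t0, m ≤ x :=
    fun x hx => PySem.List.key_head_sorted_le (h0 :: t0) (fun x => x) hmt x hx
  have hget0 : (PySem.List.pyGet? (h0 :: t0) 0).getD 0 = h0 := by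
    rw [PySem.List.pyGet?_zero]; rfl
  rw [foldA_split, hget0, hhead, hlastv]
  have h0mem : h0 ∈ h0 :: t0 := by simp
  refine Prod.ext ?_ (Prod.ext ?_ ?_)
  · exact le_antisymm
      (foldl_max_le _ _ _ (hLub h0 h0mem) (fun x hx => hLub x hx))
      (mem_le_foldl_max _ _ _ hLmem)
  · exact le_antisymm
      (foldl_min_le_mem _ _ _ hmmem)
      (le_foldl_min _ _ _ (hmlb h0 h0mem) (fun x hx => hmlb x hx))
  · simpa using hperm.sum_eq.symm
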